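-- pv_equiv track=rewrite | github.com/genp324/itea_python_basics_3 | pilin_dmitriy/04/4.01.py | pretify
-- ===== SOURCE A (Python) =====
-- exluded_symbols = ('(',')',',', '-', '.', '!', ':', '?', '\n')
--
-- exluded_words = ('a', 'may', 'an', 'to', 'the', 'is', 'of', 'have', 'been', 'are', 'was', 'were', 'will', 'would', 'could', 'and', 'or', 'if', 'he', 'she', 'it', 'this', 'my', 'an', 'as', 'by', 'has', 'in', 'on')
--
-- def pretify(text):
--     """
--     :param arg1: string
--     :type arg1: str
--     :return: return prettified list of words cleared with list of exluded_words
--     :rtype: return list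
--     """
--
--     for i in exluded_symbols:
--
--         text=text.replace(i,' ')
--
--     texts = ''
--     for i in text:
--
--         if not i.isdigit() :
--             texts += ''.join(i)
--
--     texts=texts.lower().split()
--
--     pretify_text = list(filter(lambda word: word not in exluded_words, texts))
--
--     return pretify_text
-- ===== SOURCE B (Python) =====
-- exluded_symbols = ('(',')',',', '-', '.', '!', ':', '?', '\n')
--
-- exluded_words = ('a', 'may', 'an', 'to', 'the', 'is', 'of', 'have', 'been', 'are', 'was', 'were', 'will', 'would', 'could', 'and', 'or', 'if', 'he', 'she', 'it', 'this', 'my', 'an', 'as', 'by', 'has', 'in', 'on')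
--
-- def pretify(text):
--     """Single-pass tokenizer: one scan over the characters, no intermediate strings."""
--     result = []
--     buf = []
--
--     def flush():
--         if buf:
--             word = ''.join(buf)
--             if word not in exluded_words:
--                 result.append(word)
--             buf.clear()
--
--     for ch in text:
--         if ch.isspace() or ch in exluded_symbols:
--             flush()
--         elif ch.isdigit():
--             pass
--         else:
--             buf.append(ch.lower())
--     flush()
--     return result
-- ===== Notes on version B (the rewrite author's own statement) =====
-- stated objective: alternative
-- what changed: Replaced the four-pass pipeline (9 whole-string replace passes, a digit-filter pass, lower+split, then a filter) with a single left-to-right scan that maintains a current-word buffer and emits each non-stopword word at its boundary.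
import Mathlib
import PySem

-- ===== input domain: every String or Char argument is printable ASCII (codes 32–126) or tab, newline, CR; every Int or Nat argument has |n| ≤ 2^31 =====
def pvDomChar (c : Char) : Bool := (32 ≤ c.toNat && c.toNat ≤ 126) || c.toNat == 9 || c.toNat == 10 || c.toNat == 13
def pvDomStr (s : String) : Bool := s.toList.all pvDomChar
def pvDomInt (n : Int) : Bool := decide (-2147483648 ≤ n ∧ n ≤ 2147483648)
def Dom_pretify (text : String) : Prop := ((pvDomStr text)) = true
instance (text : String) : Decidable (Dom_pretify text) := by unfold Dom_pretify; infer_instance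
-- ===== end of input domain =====

-- B replaces A's multi-pass pipeline (nine replace passes, a digit-filter pass, lower+split,
-- then a stopword filter) with a single character scan keeping a current-word buffer.


-- ===== PORT A =====
def exludedSymbolsA : List (List Char) := [['('],[')'],[','],['-'],['.'],['!'],[':'],['?'],['\n']]
def exludedWordsA : List String := ["a","may","an","to","the","is","of","have","been","are","was","were","will","would","could","and","or","if","he","she","it","this","my","an","as","by","has","in","on"]
def pretify (text : String) : List String :=
  let t := exludedSymbolsA.foldl (fun s i => PySem.Chars.replace s i [' ']) text.toList
  let texts := t.foldl (fun acc c => if !(PySem.Chars.isdigit c) then acc ++ [c] else acc) []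
  let words := PySem.Chars.split₀ (PySem.Chars.lower texts)
  (words.map (fun w => String.ofList w)).filter (fun w => !(exludedWordsA.contains w))

-- ===== PORT B =====
def symsB : List Char := ['(', ')', ',', '-', '.', '!', ':', '?', '\n']
def wordsB : List String := ["a","may","an","to","the","is","of","have","been","are","was","were","will","would","could","and","or","if","he","she","it","this","my","an","as","by","has","in","on"]
def flushB (res : List String) (buf : List Char) : List String :=
  if buf.isEmpty then res
  else if wordsB.contains (String.ofList buf) then res else res ++ [String.ofList buf]
def goB : List Char → List Char → List String → List String
  | [], buf, res => flushB res buf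
  | c :: rest, buf, res =>
    if PySem.Chars.isspace c || symsB.contains c then goB rest [] (flushB res buf)
    else if PySem.Chars.isdigit c then goB rest buf res
    else goB rest (buf ++ [PySem.Chars.lowerChar c]) res
def pretify_alt (text : String) : List String := goB text.toList [] []

-- ===== PRECONDITION & SPEC =====
def Spec_pretify (text : String) (out : List String) : Prop := out = pretify_alt text
instance (text : String) (out : List String) : Decidable (Spec_pretify text out) := by unfold Spec_pretify; infer_instance

-- ===== CLAIM (what is proved, stated in full; the proofs are below) =====
def Claim_equal_pretify : Prop := ∀ (text : String), Dom_pretify text → Spec_pretify text (pretify text)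

-- ===== LEMMAS AND PROOFS =====

-- the single-character substitution that A's nine replace passes amount to
def substF (c : Char) : Char := if symsB.contains c then ' ' else c
-- the character stream that A's split₀ actually scans
def procP (cs : List Char) : List Char :=
  PySem.Chars.lower (List.filter (fun c => !(PySem.Chars.isdigit c)) (cs.map substF))
-- A's final stopword filter, as applied to a finished word list
def keepF (ws : List String) : List String := ws.filter (fun w => !(exludedWordsA.contains w))

lemma replace_go_single (a b : Char) : ∀ (l acc : List Char),
    PySem.Chars.replace.go [a] [b] l.length l acc
      = acc.reverse ++ l.map (fun c => if c = a then b else c) := by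
  intro l
  induction l with
  | nil => intro acc; simp [PySem.Chars.replace.go]
  | cons c t ih =>
    intro acc
    simp only [List.length_cons, PySem.Chars.replace.go, List.map_cons]
    by_cases h : c = a
    · subst h
      simp [List.isPrefixOf, ih]
    · have hp : [a].isPrefixOf (c :: t) = false := by
        simp [List.isPrefixOf]; exact fun hh => (h hh.symm).elim
      simp [hp, h, ih]

lemma replace_single (a b : Char) (l : List Char) :
    PySem.Chars.replace l [a] [b] = l.map (fun c => if c = a then b else c) := by
  simp [PySem.Chars.replace, replace_go_single]

lemma foldl_replace_eq_map (l : List Char) :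
    exludedSymbolsA.foldl (fun s i => PySem.Chars.replace s i [' ']) l = l.map substF := by
  simp only [exludedSymbolsA, List.foldl_cons, List.foldl_nil]
  rw [replace_single, replace_single, replace_single, replace_single, replace_single,
      replace_single, replace_single, replace_single, replace_single]
  simp only [List.map_map]
  refine List.map_congr_left (fun c _ => ?_)
  simp only [Function.comp_def, substF]
  by_cases hm : symsB.contains c = true
  · rw [if_pos hm]
    simp only [symsB, List.contains_cons, List.contains_nil, Bool.or_eq_true, beq_iff_eq] at hm
    rcases hm with h|h|h|h|h|h|h|h|h|h
    all_goals first | (subst h; rfl) | (exact absurd h (by decide))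
  · rw [if_neg hm]
    simp only [symsB, List.contains_cons, List.contains_nil, Bool.or_eq_true, beq_iff_eq,
      not_or] at hm
    push Not at hm
    obtain ⟨h1, h2, h3, h4, h5, h6, h7, h8, h9, -⟩ := hm
    rw [if_neg h1, if_neg h2, if_neg h3, if_neg h4, if_neg h5, if_neg h6, if_neg h7,
      if_neg h8, if_neg h9]

lemma isdigit_of_isspace (c : Char) (h : PySem.Chars.isspace c = true) :
    PySem.Chars.isdigit c = false := by
  simp only [PySem.Chars.isspace, PySem.Chars.isdigit, Bool.or_eq_true, Bool.and_eq_true,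
    Bool.and_eq_false_iff, decide_eq_true_eq, decide_eq_false_iff_not, Char.le_def,
    UInt32.le_iff_toNat_le, Char.toNat, show '0'.val.toNat = 48 from rfl,
    show '9'.val.toNat = 57 from rfl] at *
  omega

lemma isupper_of_isspace (c : Char) (h : PySem.Chars.isspace c = true) :
    PySem.Chars.isupper c = false := by
  simp only [PySem.Chars.isspace, PySem.Chars.isupper, Bool.or_eq_true, Bool.and_eq_true,
    Bool.and_eq_false_iff, decide_eq_true_eq, decide_eq_false_iff_not, Char.le_def,
    UInt32.le_iff_toNat_le, Char.toNat, show 'A'.val.toNat = 65 from rfl,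
    show 'Z'.val.toNat = 90 from rfl] at *
  omega

lemma lowerChar_of_isspace (c : Char) (h : PySem.Chars.isspace c = true) :
    PySem.Chars.lowerChar c = c := by
  simp [PySem.Chars.lowerChar, isupper_of_isspace c h]

lemma isspace_lowerChar (c : Char) (h : PySem.Chars.isspace c = false) :
    PySem.Chars.isspace (PySem.Chars.lowerChar c) = false := by
  simp only [PySem.Chars.lowerChar]
  by_cases hu : PySem.Chars.isupper c = true
  · rw [if_pos hu]
    simp only [PySem.Chars.isupper, Bool.and_eq_true, decide_eq_true_eq, Char.le_def,
      UInt32.le_iff_toNat_le, show 'A'.val.toNat = 65 from rfl,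
      show 'Z'.val.toNat = 90 from rfl] at hu
    have hv : (Char.ofNat (c.val.toNat + 32)).val.toNat = c.val.toNat + 32 := by
      have hvv := Char.toNat_ofNat (c.val.toNat + 32)
      rw [if_pos (Or.inl (by omega))] at hvv
      exact hvv
    simp only [PySem.Chars.isspace, Bool.or_eq_false_iff, Bool.and_eq_false_iff,
      decide_eq_false_iff_not, Char.toNat, hv]
    omega
  · rw [if_neg hu]; exact h

lemma substF_of_not_sym (c : Char) (h : symsB.contains c = false) : substF c = c := by
  unfold substF
  rw [if_neg (by rw [h]; exact Bool.false_ne_true)]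

lemma isspace_substF (c : Char)
    (h : (PySem.Chars.isspace c || symsB.contains c) = true) :
    PySem.Chars.isspace (substF c) = true := by
  by_cases hm : symsB.contains c = true
  · unfold substF
    rw [if_pos hm]
    decide
  · have hm' : symsB.contains c = false := by
      cases hc : symsB.contains c
      · rfl
      · exact absurd hc hm
    rw [substF_of_not_sym c hm']
    rw [hm', Bool.or_false] at h
    exact h

-- how one input character shows up in the stream A splits
lemma procP_cons_boundary (c : Char) (cs : List Char)
    (h : (PySem.Chars.isspace c || symsB.contains c) = true) :
    procP (c :: cs) = substF c :: procP cs ∧ PySem.Chars.isspace (substF c) = true := by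
  have hs := isspace_substF c h
  have hd := isdigit_of_isspace _ hs
  refine ⟨?_, hs⟩
  simp [procP, PySem.Chars.lower, hd, lowerChar_of_isspace _ hs]

lemma procP_cons_digit (c : Char) (cs : List Char)
    (hb : (PySem.Chars.isspace c || symsB.contains c) = false)
    (hd : PySem.Chars.isdigit c = true) :
    procP (c :: cs) = procP cs := by
  have hns : symsB.contains c = false := by
    rcases Bool.or_eq_false_iff.mp hb with ⟨_, h2⟩; exact h2
  simp [procP, substF_of_not_sym c hns, hd]

lemma procP_cons_word (c : Char) (cs : List Char)
    (hb : (PySem.Chars.isspace c || symsB.contains c) = false)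
    (hd : PySem.Chars.isdigit c = false) :
    procP (c :: cs) = PySem.Chars.lowerChar c :: procP cs ∧
      PySem.Chars.isspace (PySem.Chars.lowerChar c) = false := by
  rcases Bool.or_eq_false_iff.mp hb with ⟨h1, h2⟩
  exact ⟨by simp [procP, PySem.Chars.lower, substF_of_not_sym c h2, hd],
    isspace_lowerChar c h1⟩

lemma keepF_map_append (ws : List (List Char)) (w : List Char) :
    keepF ((ws ++ [w]).map (fun x => String.ofList x))
      = keepF (ws.map (fun x => String.ofList x)) ++ keepF [String.ofList w] := by
  simp [keepF, List.filter_append]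

lemma flushB_eq_append (res : List String) (buf : List Char) (h : buf ≠ []) :
    flushB res buf = res ++ keepF [String.ofList buf] := by
  unfold flushB keepF
  rw [if_neg (by simp [h])]
  by_cases hc : wordsB.contains (String.ofList buf) = true
  · rw [if_pos hc]
    have hm : String.ofList buf ∈ exludedWordsA := by
      have : exludedWordsA.contains (String.ofList buf) = true := hc
      simpa using this
    simp [List.filter, hm]
  · rw [if_neg hc]
    have hc' : exludedWordsA.contains (String.ofList buf) = false := by
      cases h' : wordsB.contains (String.ofList buf)
      · exact h'
      · exact absurd h' hc
    have hm : String.ofList buf ∉ exludedWordsA := by simpa using hc'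
    simp [List.filter, hm]

lemma main_loop : ∀ (cs cur : List Char) (acc : List (List Char)),
    keepF ((PySem.Chars.split₀.go (procP cs) cur acc).map (fun w => String.ofList w))
      = goB cs cur.reverse (keepF ((acc.reverse).map (fun w => String.ofList w))) := by
  intro cs
  induction cs with
  | nil =>
    intro cur acc
    have hP : procP [] = [] := by simp [procP, PySem.Chars.lower]
    rw [hP]
    cases cur with
    | nil => simp [PySem.Chars.split₀.go, goB, flushB]
    | cons x xs =>
      rw [PySem.Chars.split₀.go, if_neg (by simp)]
      show keepF (((((x :: xs).reverse :: acc)).reverse.map (fun w => String.ofList w))) = _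
      rw [List.reverse_cons, keepF_map_append]
      simp only [goB]
      rw [flushB_eq_append _ _ (by simp)]
  | cons c cs' ih =>
    intro cur acc
    by_cases hb : (PySem.Chars.isspace c || symsB.contains c) = true
    · obtain ⟨hP, hs⟩ := procP_cons_boundary c cs' hb
      rw [hP, PySem.Chars.split₀.go, if_pos hs]
      simp only [goB, hb, if_pos]
      cases cur with
      | nil =>
        rw [if_pos (by simp)]
        simpa [flushB] using ih [] acc
      | cons x xs =>
        rw [if_neg (by simp)]
        have := ih [] ((x :: xs).reverse :: acc)
        simp only [List.reverse_nil] at this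
        rw [this, List.reverse_cons, keepF_map_append,
          flushB_eq_append _ _ (by simp)]
    · have hb' : (PySem.Chars.isspace c || symsB.contains c) = false := by
        cases h' : (PySem.Chars.isspace c || symsB.contains c)
        · rfl
        · exact absurd h' hb
      by_cases hd : PySem.Chars.isdigit c = true
      · rw [procP_cons_digit c cs' hb' hd]
        simp only [goB, hb', Bool.false_eq_true, if_false, hd, if_true]
        exact ih cur acc
      · have hd' : PySem.Chars.isdigit c = false := by
          cases h' : PySem.Chars.isdigit c
          · rfl
          · exact absurd h' hd
        obtain ⟨hP, hw⟩ := procP_cons_word c cs' hb' hd'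
        rw [hP, PySem.Chars.split₀.go, if_neg (by simp [hw])]
        simp only [goB, hb', Bool.false_eq_true, if_false, hd', if_false]
        have := ih (PySem.Chars.lowerChar c :: cur) acc
        rw [this, List.reverse_cons]

-- ===== VERDICT (by name: the statement is the Claim_ definition above) =====
theorem pretify_spec : Claim_equal_pretify := by
  intro text _
  show pretify text = pretify_alt text
  unfold pretify pretify_alt
  simp only [foldl_replace_eq_map, PySem.List.foldl_append_if_eq_filter, List.nil_append]
  have := main_loop text.toList [] []
  simpa [procP, keepF, PySem.Chars.split₀] using this
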